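-- pv_equiv track=rewrite | github.com/sinkyoungdeok/ps | kakao/2018/블라인드/캐시.py | solution
-- ===== SOURCE A (Python) =====
-- def solution(cacheSize, cities):
--     s = set()
--     q = []
--     answer = 0
--
--     for i in cities:
--         i = i.lower()
--
--         if i in s:
--             answer += 1
--             q.remove(i)
--             q.append(i)
--             continue
--
--         answer += 5
--
--         if 0 == cacheSize:
--             continue
--
--         if len(q) == cacheSize:
--             temp = q[0]
--             del q[0]
--             s.remove(temp)
--
--         q.append(i)
--         s.add(i)
--
--     return answer
-- ===== SOURCE B (Python) =====
-- def solution(cacheSize, cities):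
--     cache = {}   # lowercased city -> timestamp of its last access
--     time = 0
--     answer = 0
--     for city in cities:
--         c = city.lower()
--         if c in cache:
--             answer += 1
--             cache[c] = time
--         else:
--             answer += 5
--             if cacheSize != 0:
--                 if len(cache) == cacheSize:
--                     victim = None
--                     vt = None
--                     for k, ts in cache.items():
--                         if vt is None or ts < vt:
--                             victim, vt = k, ts
--                     del cache[victim]
--                 cache[c] = time
--         time += 1
--     return answer
-- ===== Notes on version B (the rewrite author's own statement) =====
-- stated objective: alternative
-- what changed: Replaces A's explicit FIFO-of-recency queue plus membership set by a single dict mapping each cached lowercased city to its last-access timestamp; a hit just overwrites the timestamp instead of a list.remove/append, and eviction scans the dict for the minimum-timestamp key instead of popping q[0].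
import Mathlib
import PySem

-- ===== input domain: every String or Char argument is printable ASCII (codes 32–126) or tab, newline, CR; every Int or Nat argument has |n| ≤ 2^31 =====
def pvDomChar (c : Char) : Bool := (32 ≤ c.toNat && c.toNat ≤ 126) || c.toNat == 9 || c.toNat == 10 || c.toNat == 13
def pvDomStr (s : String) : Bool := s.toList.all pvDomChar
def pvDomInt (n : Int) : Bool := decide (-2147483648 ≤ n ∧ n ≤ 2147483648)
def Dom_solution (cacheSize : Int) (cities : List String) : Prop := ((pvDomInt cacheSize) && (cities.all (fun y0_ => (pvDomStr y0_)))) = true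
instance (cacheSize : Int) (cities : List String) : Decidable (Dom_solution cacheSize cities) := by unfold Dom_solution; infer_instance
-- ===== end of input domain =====

-- B replaces A's explicit queue+set LRU bookkeeping by a single dict from city to
-- last-access timestamp, evicting the minimum-timestamp key (objective: alternative).

-- B replaces A's explicit queue+set LRU bookkeeping by a single dict from each cached
-- (lowercased) city to its last-access timestamp, evicting the minimum-timestamp key
-- (objective: alternative).

-- ===== PORT A =====
-- one iteration of A's for-loop; state = (s, q, answer)
def stepA (cacheSize : Int) (st : PySem.Set String × List String × Int) (city : String) :
    PySem.Set String × List String × Int :=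
  let i := PySem.Str.lower city
  match st with
  | (s, q, answer) =>
    if PySem.Set.contains s i then
      (s, ((PySem.List.remove? q i).getD q) ++ [i], answer + 1)
    else if cacheSize = 0 then
      (s, q, answer + 5)
    else if (q.length : Int) = cacheSize then
      match q with
      | [] => (PySem.Set.add s i, [i], answer + 5)
      | temp :: rest =>
        (PySem.Set.add ((PySem.Set.remove? s temp).getD s) i, rest ++ [i], answer + 5)
    else
      (PySem.Set.add s i, q ++ [i], answer + 5)

def solution (cacheSize : Int) (cities : List String) : Int :=
  (cities.foldl (stepA cacheSize) (PySem.Set.empty, [], 0)).2.2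

-- ===== PORT B =====
-- B's inner victim-search loop: running (victim, vt) as an Option
def minFold (acc : Option (String × Int)) (p : String × Int) : Option (String × Int) :=
  match acc with
  | none => some p
  | some (k, vt) => if p.2 < vt then some p else some (k, vt)

-- one iteration of B's for-loop; state = (cache, time, answer)
def stepB (cacheSize : Int) (st : PySem.Dict String Int × Int × Int) (city : String) :
    PySem.Dict String Int × Int × Int :=
  let c := PySem.Str.lower city
  match st with
  | (cache, time, answer) =>
    if cache.contains c then
      (cache.insert c time, time + 1, answer + 1)
    else
      if cacheSize ≠ 0 then
        let cache1 :=
          if (cache.size : Int) = cacheSize then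
            match cache.items.foldl minFold none with
            | none => cache
            | some (victim, _) => cache.erase victim
          else cache
        (cache1.insert c time, time + 1, answer + 5)
      else
        (cache, time + 1, answer + 5)

def solution_alt (cacheSize : Int) (cities : List String) : Int :=
  (cities.foldl (stepB cacheSize) (PySem.Dict.empty, 0, 0)).2.2

-- ===== PRECONDITION & SPEC =====
def Spec_solution (cacheSize : Int) (cities : List String) (out : Int) : Prop := out = solution_alt cacheSize cities
instance (cacheSize : Int) (cities : List String) (out : Int) : Decidable (Spec_solution cacheSize cities out) := by unfold Spec_solution; infer_instance

-- ===== CLAIM (what is proved, stated in full; the proofs are below) =====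
def Claim_equal_solution : Prop := ∀ (cacheSize : Int) (cities : List String), Dom_solution cacheSize cities → Spec_solution cacheSize cities (solution cacheSize cities)

-- ===== LEMMAS AND PROOFS =====

-- the coupling invariant between A's state (s, q, answer) and B's state (cache, time, answer):
-- answers agree, s is the set of elements of q, q is duplicate-free, and cache's items are a
-- permutation of q paired with strictly increasing timestamps, all below the current time.
def InvAB (stA : PySem.Set String × List String × Int) (stB : PySem.Dict String Int × Int × Int) : Prop :=
  stA.2.2 = stB.2.2 ∧ (∀ x, x ∈ stA.1 ↔ x ∈ stA.2.1) ∧ stA.1.Nodup ∧ stA.2.1.Nodup ∧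
  ∃ ts : List Int, ts.length = stA.2.1.length ∧ ts.Pairwise (· < ·) ∧ (∀ v ∈ ts, v < stB.2.1) ∧
    stB.1.items.Perm (stA.2.1.zip ts)

theorem map_noop (i : String) (t : Int) (l : List (String × Int)) (h : ∀ p ∈ l, p.1 ≠ i) :
    l.map (fun p => if p.1 == i then (i, t) else p) = l := by
  have := List.map_congr_left (l := l) (f := fun p => if p.1 == i then (i, t) else p) (g := id)
    (fun p hp => by simp [h p hp])
  simpa using this

theorem zip_snoc {α β : Type} (a : List α) (b : List β) (x : α) (y : β) (h : a.length = b.length) :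
    (a ++ [x]).zip (b ++ [y]) = a.zip b ++ [(x, y)] := by
  rw [List.zip_append h]; rfl

theorem minFold_spec (l : List (String × Int)) (m0 : String × Int) :
    ∃ m, l.foldl minFold (some m0) = some m ∧ (m ∈ l ∨ m = m0) ∧ m.2 ≤ m0.2 ∧ ∀ x ∈ l, m.2 ≤ x.2 := by
  induction l generalizing m0 with
  | nil => exact ⟨m0, rfl, Or.inr rfl, le_refl _, by simp⟩
  | cons p l ih =>
    by_cases hp : p.2 < m0.2
    · obtain ⟨m, h1, h2, h3, h4⟩ := ih p
      refine ⟨m, ?_, ?_, ?_, ?_⟩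
      · simpa [List.foldl_cons, minFold, hp] using h1
      · rcases h2 with h | h
        · exact Or.inl (List.mem_cons_of_mem _ h)
        · exact Or.inl (h ▸ List.mem_cons_self)
      · exact (lt_of_le_of_lt h3 hp).le
      · intro x hx
        rcases List.mem_cons.mp hx with rfl | hx
        · exact h3
        · exact h4 x hx
    · obtain ⟨m, h1, h2, h3, h4⟩ := ih m0
      refine ⟨m, ?_, ?_, h3, ?_⟩
      · simpa [List.foldl_cons, minFold, hp] using h1
      · rcases h2 with h | h
        · exact Or.inl (List.mem_cons_of_mem _ h)
        · exact Or.inr h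
      · intro x hx
        rcases List.mem_cons.mp hx with rfl | hx
        · exact le_trans h3 (not_lt.mp hp)
        · exact h4 x hx

theorem hit_perm (i : String) (t : Int) : ∀ (q : List String) (ts : List Int), q.Nodup → i ∈ q → ts.length = q.length →
    ((q.zip ts).map (fun p => if p.1 == i then (i, t) else p)).Perm
      ((q.erase i ++ [i]).zip (ts.eraseIdx (q.idxOf i) ++ [t])) := by
  intro q
  induction q with
  | nil => intro ts _ hi _; simp at hi
  | cons a q ih =>
    intro ts hnd hi hlen
    cases ts with
    | nil => simp at hlen
    | cons v ts =>
      simp only [List.length_cons, Nat.succ_inj] at hlen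
      by_cases hai : a = i
      · subst hai
        have hnotin : a ∉ q := (List.nodup_cons.mp hnd).1
        have hmap : (q.zip ts).map (fun p => if p.1 == a then (a, t) else p) = q.zip ts :=
          map_noop a t _ (fun p hp => fun he => hnotin (he ▸ (List.of_mem_zip hp).1))
        simp only [List.zip_cons_cons, List.map_cons, beq_self_eq_true, List.erase_cons_head,
          List.idxOf_cons_self, List.eraseIdx_zero, List.tail_cons, if_true, hmap,
          zip_snoc q ts a t hlen.symm]
        exact (List.perm_append_singleton (a, t) (q.zip ts)).symm
      · have hiq : i ∈ q := by
          rcases List.mem_cons.mp hi with h | h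
          · exact absurd h.symm hai
          · exact h
        have hne : (a == i) = false := by simp [hai]
        have hidx : (a :: q).idxOf i = q.idxOf i + 1 := by
          simp [List.idxOf_cons, hne]
        have herase : (a :: q).erase i = a :: q.erase i := List.erase_cons_tail (by simp [hai])
        rw [hidx, herase]
        simp only [List.zip_cons_cons, List.map_cons, hne, List.eraseIdx_cons_succ, if_false,
          List.cons_append, List.zip_cons_cons, Bool.false_eq_true]
        exact (ih ts (List.nodup_cons.mp hnd).2 hiq hlen).cons (a, v)

theorem invAB_step (cacheSize : Int) (a : PySem.Set String × List String × Int)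
    (b : PySem.Dict String Int × Int × Int) (city : String) (h : InvAB a b) :
    InvAB (stepA cacheSize a city) (stepB cacheSize b city) := by
  obtain ⟨s, q, ans⟩ := a
  obtain ⟨d, t, ans2⟩ := b
  obtain ⟨hans, hsq, hsnd, hqnd, ts, hlen, hpw, hlt, hperm⟩ := h
  dsimp only at hans hsq hsnd hqnd hlen hlt hperm
  set i := PySem.Str.lower city with hi
  have hkeys : ∀ x, d.contains x = true ↔ x ∈ q := by
    intro x
    unfold PySem.Dict.contains
    rw [List.any_eq_true]
    constructor
    · rintro ⟨p, hp, hpx⟩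
      exact (eq_of_beq hpx) ▸ (List.of_mem_zip (hperm.mem_iff.mp hp)).1
    · intro hx
      have : x ∈ (q.zip ts).map Prod.fst := by
        rw [List.map_fst_zip (le_of_eq hlen.symm)]; exact hx
      obtain ⟨p, hp, hpx⟩ := List.mem_map.mp this
      exact ⟨p, hperm.mem_iff.mpr hp, by simp [hpx]⟩
  have hsz : d.size = q.length := by
    unfold PySem.Dict.size
    rw [hperm.length_eq, List.length_zip, hlen, min_self]
  have hscont : ∀ x, PySem.Set.contains s x = true ↔ x ∈ q := by
    intro x; rw [PySem.Set.contains_iff]; exact hsq x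
  by_cases hm : i ∈ q
  · -- HIT
    have hA : PySem.Set.contains s i = true := (hscont i).mpr hm
    have hB : d.contains i = true := (hkeys i).mpr hm
    have hrem : PySem.List.remove? q i = some (q.erase i) := PySem.List.remove?_eq_some_erase q i hm
    simp only [stepA, stepB, hA, hB, if_true, hrem, Option.getD_some, ← hi]
    unfold InvAB
    dsimp only
    have hiq' : i ∉ q.erase i := fun hc => ((List.Nodup.mem_erase_iff hqnd).mp hc).1 rfl
    have hn : q.idxOf i < ts.length := by rw [hlen]; exact List.idxOf_lt_length_of_mem hm
    refine ⟨by simpa using hans, ?_, hsnd, ?_, ts.eraseIdx (q.idxOf i) ++ [t], ?_, ?_, ?_, ?_⟩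
    · intro x
      rw [hsq x, List.mem_append, List.mem_singleton, List.Nodup.mem_erase_iff hqnd]
      constructor
      · intro hx
        by_cases hxi : x = i
        · exact Or.inr hxi
        · exact Or.inl ⟨hxi, hx⟩
      · rintro (⟨_, hx⟩ | rfl)
        · exact hx
        · exact hm
    · exact (List.Nodup.erase i hqnd).append (List.nodup_singleton i) (by simpa using hiq')
    · simp [List.length_eraseIdx_of_lt hn, hlen, List.length_erase_of_mem hm,
        Nat.sub_add_cancel (List.length_pos_of_mem hm)]
    · rw [List.pairwise_append]
      refine ⟨hpw.sublist (List.eraseIdx_sublist ts _), List.pairwise_singleton _ _, ?_⟩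
      intro v hv w hw
      rw [List.mem_singleton] at hw
      exact hw ▸ hlt v (List.mem_of_mem_eraseIdx hv)
    · intro v hv
      rcases List.mem_append.mp hv with hv | hv
      · exact lt_trans (hlt v (List.mem_of_mem_eraseIdx hv)) (by omega)
      · rw [List.mem_singleton] at hv; omega
    · have : (d.insert i t).items = d.items.map (fun p => if p.1 == i then (i, t) else p) :=
        PySem.Dict.items_insert_of_contains d t hB
      rw [this]
      exact (hperm.map _).trans (hit_perm i t q ts hqnd hm hlen)
  · -- MISS
    have hA : PySem.Set.contains s i = false := by
      rw [Bool.eq_false_iff]; intro hc; exact hm ((hscont i).mp hc)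
    have hB : d.contains i = false := by
      rw [Bool.eq_false_iff]; intro hc; exact hm ((hkeys i).mp hc)
    by_cases hcs : cacheSize = 0
    · simp only [stepA, stepB, hA, hB, if_false, hcs, if_true, Bool.false_eq_true, ne_eq,
        not_true_eq_false, ← hi]
      unfold InvAB
      dsimp only
      exact ⟨by simpa using hans, hsq, hsnd, hqnd, ts, hlen, hpw,
        fun v hv => lt_trans (hlt v hv) (by omega), hperm⟩
    · by_cases hq : (q.length : Int) = cacheSize
      · -- EVICT
        cases q with
        | nil => exact absurd (by simpa using hq.symm) hcs
        | cons temp rest =>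
          cases ts with
          | nil => simp at hlen
          | cons v0 vrest =>
            simp only [List.length_cons, Nat.succ_inj] at hlen
            have hdsz : (d.size : Int) = cacheSize := by rw [hsz]; exact hq
            -- min scan returns (temp, v0)
            have hitems_ne : d.items ≠ [] := by
              intro hc
              have := hperm.length_eq
              rw [hc] at this; simp at this
            obtain ⟨h0, tl, hitems⟩ := List.exists_cons_of_ne_nil hitems_ne
            have hmin : d.items.foldl minFold none = some (temp, v0) := by
              have hfold : d.items.foldl minFold none = tl.foldl minFold (some h0) := by
                rw [hitems]; rfl
              obtain ⟨m, h1, h2, h3, h4⟩ := minFold_spec tl h0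
              have hmem : m ∈ d.items := by
                rw [hitems]
                rcases h2 with h | h
                · exact List.mem_cons_of_mem _ h
                · exact h ▸ List.mem_cons_self
              have hminall : ∀ x ∈ d.items, m.2 ≤ x.2 := by
                intro x hx
                rw [hitems] at hx
                rcases List.mem_cons.mp hx with rfl | hx
                · exact h3
                · exact h4 x hx
              have hmzip : m ∈ (temp :: rest).zip (v0 :: vrest) := hperm.mem_iff.mp hmem
              have hm2 : m.2 ≤ v0 := by
                have : (temp, v0) ∈ d.items := hperm.mem_iff.mpr (by simp [List.zip_cons_cons])
                exact hminall _ this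
              have : m = (temp, v0) := by
                rw [List.zip_cons_cons, List.mem_cons] at hmzip
                rcases hmzip with h | h
                · exact h
                · exfalso
                  have hv0lt : v0 < m.2 := by
                    have := (List.pairwise_cons.mp hpw).1
                    exact this m.2 (List.of_mem_zip h).2
                  omega
              rw [hfold, h1, this]
            have hsrem : PySem.Set.remove? s temp = some (s.discard temp) :=
              PySem.Set.remove?_of_mem ((hsq temp).mpr List.mem_cons_self)
            simp only [stepA, stepB, hA, hB, if_false, if_pos hq, if_pos hdsz,
              hmin, hsrem, Option.getD_some, ne_eq, hcs, not_false_iff, if_true, ← hi,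
              Bool.false_eq_true]
            unfold InvAB
            dsimp only
            -- erased dict
            have htemp_ne : ∀ p ∈ rest.zip vrest, (p.1 == temp) = false := by
              intro p hp
              have : p.1 ∈ rest := (List.of_mem_zip hp).1
              have : p.1 ≠ temp := fun he => (List.nodup_cons.mp hqnd).1 (he ▸ this)
              simp [this]
            have herased : (d.erase temp).items.Perm (rest.zip vrest) := by
              unfold PySem.Dict.erase
              have hthis := hperm.filter (fun p => !(p.1 == temp))
              have hfeq : List.filter (fun p => !(p.1 == temp)) (rest.zip vrest) = rest.zip vrest :=
                List.filter_eq_self.mpr (fun p hp => by simp [htemp_ne p hp])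
              simp only [List.zip_cons_cons, List.filter_cons, beq_self_eq_true,
                Bool.not_true, hfeq] at hthis
              simpa using hthis
            have hcont2 : (d.erase temp).contains i = false := by
              rw [Bool.eq_false_iff]
              intro hc
              unfold PySem.Dict.contains at hc
              rw [List.any_eq_true] at hc
              obtain ⟨p, hp, hpx⟩ := hc
              have : p.1 ∈ rest := (List.of_mem_zip (herased.mem_iff.mp hp)).1
              exact hm (List.mem_cons_of_mem _ (eq_of_beq hpx ▸ this))
            have hins : ((d.erase temp).insert i t).items = (d.erase temp).items ++ [(i, t)] :=
              PySem.Dict.items_insert_of_not_contains _ t hcont2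
            have hqnd' := List.nodup_cons.mp hqnd
            have hpw' := List.pairwise_cons.mp hpw
            refine ⟨by simpa using hans, ?_, ?_, ?_, vrest ++ [t], ?_, ?_, ?_, ?_⟩
            · intro x
              have hxt : x ∈ rest → x ≠ temp := fun hr he => hqnd'.1 (he ▸ hr)
              rw [PySem.Set.mem_add, PySem.Set.mem_discard, hsq x]
              simp only [List.mem_cons, List.mem_append,
                List.not_mem_nil, or_false]
              constructor
              · rintro (⟨h1, h2⟩ | rfl)
                · rcases h1 with rfl | h1
                  · exact absurd rfl h2
                  · exact Or.inl h1
                · exact Or.inr rfl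
              · rintro (h1 | rfl)
                · exact Or.inl ⟨Or.inr h1, hxt h1⟩
                · exact Or.inr rfl
            · exact PySem.Set.nodup_add _ i (PySem.Set.nodup_discard s temp hsnd)
            · rw [List.nodup_append]
              refine ⟨hqnd'.2, List.nodup_singleton i, ?_⟩
              intro a ha b hb
              rw [List.mem_singleton] at hb
              subst hb
              exact fun hab => hm (List.mem_cons_of_mem _ (hab ▸ ha))
            · simp [hlen]
            · rw [List.pairwise_append]
              refine ⟨hpw'.2, List.pairwise_singleton _ _, ?_⟩
              intro v hv w hw
              rw [List.mem_singleton] at hw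
              exact hw ▸ hlt v (List.mem_cons_of_mem _ hv)
            · intro v hv
              rcases List.mem_append.mp hv with hv | hv
              · exact lt_trans (hlt v (List.mem_cons_of_mem _ hv)) (by omega)
              · rw [List.mem_singleton] at hv; omega
            · rw [hins]
              refine (herased.append_right [(i, t)]).trans ?_
              rw [zip_snoc rest vrest i t hlen.symm]
      · -- APPEND
        have hdsz : ¬((d.size : Int) = cacheSize) := by rw [hsz]; exact hq
        simp only [stepA, stepB, hA, hB, if_false, if_neg hq, if_neg hdsz,
          ne_eq, hcs, not_false_iff, if_true, ← hi, Bool.false_eq_true]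
        unfold InvAB
        dsimp only
        have hins : (d.insert i t).items = d.items ++ [(i, t)] :=
          PySem.Dict.items_insert_of_not_contains d t hB
        refine ⟨by simpa using hans, ?_, ?_, ?_, ts ++ [t], ?_, ?_, ?_, ?_⟩
        · intro x
          rw [PySem.Set.mem_add, hsq x, List.mem_append, List.mem_singleton]
        · exact PySem.Set.nodup_add s i hsnd
        · rw [List.nodup_append]
          refine ⟨hqnd, List.nodup_singleton i, ?_⟩
          intro a ha b hb
          rw [List.mem_singleton] at hb
          subst hb
          exact fun hab => hm (hab ▸ ha)
        · simp [hlen]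
        · rw [List.pairwise_append]
          exact ⟨hpw, List.pairwise_singleton _ _, fun v hv w hw => by
            rw [List.mem_singleton] at hw; exact hw ▸ hlt v hv⟩
        · intro v hv
          rcases List.mem_append.mp hv with hv | hv
          · exact lt_trans (hlt v hv) (by omega)
          · rw [List.mem_singleton] at hv; omega
        · rw [hins, zip_snoc q ts i t hlen.symm]
          exact hperm.append_right [(i, t)]

theorem invAB_foldl (cacheSize : Int) (cities : List String)
    (a : PySem.Set String × List String × Int) (b : PySem.Dict String Int × Int × Int)
    (h : InvAB a b) :
    InvAB (cities.foldl (stepA cacheSize) a) (cities.foldl (stepB cacheSize) b) := by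
  induction cities generalizing a b with
  | nil => exact h
  | cons c rest ih => exact ih _ _ (invAB_step cacheSize a b c h)

-- ===== VERDICT (by name: the statement is the Claim_ definition above) =====
theorem solution_spec : Claim_equal_solution := by
  intro cacheSize cities _
  unfold Spec_solution solution solution_alt
  have h0 : InvAB (PySem.Set.empty, ([] : List String), (0 : Int)) (PySem.Dict.empty, (0 : Int), (0 : Int)) := by
    refine ⟨rfl, by simp [PySem.Set.empty], by simp [PySem.Set.empty], by simp, ⟨[], by simp, by simp, by simp, by simp [PySem.Dict.empty]⟩⟩
  exact (invAB_foldl cacheSize cities _ _ h0).1
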